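-- pv_equiv track=rewrite | github.com/Flower2103/Lenguajes_Automatas_I | lenguajes_A1/main.py | token_string
-- ===== SOURCE A (Python) =====
-- def token_string(array):
--     tokens= []
--     agrupados = False
--
--     for token, _ in array:
--         if (token >= 65 and token <= 90) or (token >= 97 and token <= 122):
--             if not agrupados:
--                 tokens.append(555)
--                 agrupados = True
--         else:
--             agrupados = False
--             tokens.append(token)
--     return tokens
-- ===== SOURCE B (Python) =====
-- from itertools import groupby
--
-- def token_string(array):
--     tokens = []
--     for is_letter, group in groupby(array, key=lambda pair: (65 <= pair[0] <= 90) or (97 <= pair[0] <= 122)):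
--         if is_letter:
--             tokens.append(555)
--         else:
--             tokens.extend(token for token, _ in group)
--     return tokens
-- ===== Notes on version B (the rewrite author's own statement) =====
-- stated objective: idiomatic
-- what changed: Replaces the explicit agrupados state flag with itertools.groupby run-grouping on the is-letter key: each letter run yields one 555, each non-letter run is extended token by token.
import Mathlib
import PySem

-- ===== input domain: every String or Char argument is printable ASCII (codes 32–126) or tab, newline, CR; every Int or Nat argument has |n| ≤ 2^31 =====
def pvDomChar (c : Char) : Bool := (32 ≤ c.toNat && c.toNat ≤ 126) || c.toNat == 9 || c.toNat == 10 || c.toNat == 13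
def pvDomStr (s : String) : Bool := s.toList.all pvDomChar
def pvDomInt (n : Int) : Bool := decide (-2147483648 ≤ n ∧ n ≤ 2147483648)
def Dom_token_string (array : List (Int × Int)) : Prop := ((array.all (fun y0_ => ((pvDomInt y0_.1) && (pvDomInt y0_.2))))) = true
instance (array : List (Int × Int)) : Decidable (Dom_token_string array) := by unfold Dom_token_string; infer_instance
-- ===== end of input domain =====

-- B replaces A's explicit `agrupados` flag with run-grouping (itertools.groupby on the
-- is-letter key): one 555 per letter run, non-letter runs passed through token by token.


-- ===== PORT A =====
-- literal transliteration of A: a fold carrying (tokens, agrupados)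
def token_string (array : List (Int × Int)) : List Int :=
  (array.foldl (fun (st : List Int × Bool) p =>
      let token := p.1
      if (65 ≤ token && token ≤ 90) || (97 ≤ token && token ≤ 122) then
        if !st.2 then (st.1 ++ [555], true) else st
      else (st.1 ++ [token], false))
    ([], false)).1

-- ===== PORT B =====
-- is-letter key of B's groupby
def pvIsLetter (p : Int × Int) : Bool :=
  (65 ≤ p.1 && p.1 ≤ 90) || (97 ≤ p.1 && p.1 ≤ 122)

-- groupby: peel off one maximal same-key run at a time (run = takeWhile key-equal)
def token_string_alt (array : List (Int × Int)) : List Int :=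
  match array with
  | [] => []
  | p :: rest =>
    let k := pvIsLetter p
    let run := rest.takeWhile (fun q => pvIsLetter q == k)
    let rest' := rest.dropWhile (fun q => pvIsLetter q == k)
    if k then 555 :: token_string_alt rest'
    else p.1 :: run.map (·.1) ++ token_string_alt rest'
termination_by array.length
decreasing_by
  simpa using Nat.lt_succ_of_le (List.length_dropWhile_le _ _)
  simpa using Nat.lt_succ_of_le (List.length_dropWhile_le _ _)

-- ===== PRECONDITION & SPEC =====
def Spec_token_string (array : List (Int × Int)) (out : List Int) : Prop := out = token_string_alt array
instance (array : List (Int × Int)) (out : List Int) : Decidable (Spec_token_string array out) := by unfold Spec_token_string; infer_instance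

-- ===== CLAIM (what is proved, stated in full; the proofs are below) =====
def Claim_equal_token_string : Prop := ∀ (array : List (Int × Int)), Dom_token_string array → Spec_token_string array (token_string array)

-- ===== LEMMAS AND PROOFS =====

-- A's loop as a flag-indexed recursion (the suffix it still appends)
def aGo (g : Bool) (l : List (Int × Int)) : List Int :=
  match l with
  | [] => []
  | p :: rest =>
    if pvIsLetter p then
      if !g then 555 :: aGo true rest else aGo true rest
    else p.1 :: aGo false rest

theorem token_string_fst (l : List (Int × Int)) (acc : List Int) (g : Bool) :
    (l.foldl (fun (st : List Int × Bool) p =>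
      let token := p.1
      if (65 ≤ token && token ≤ 90) || (97 ≤ token && token ≤ 122) then
        if !st.2 then (st.1 ++ [555], true) else st
      else (st.1 ++ [token], false)) (acc, g)).1 = acc ++ aGo g l := by
  induction l generalizing acc g with
  | nil => simp [aGo]
  | cons p rest ih =>
    rw [List.foldl_cons]
    by_cases h : pvIsLetter p = true
    · simp only [pvIsLetter] at h
      cases g
      · simp only [h, if_true, Bool.not_false]
        rw [ih]
        simp [aGo, pvIsLetter, h]
      · simp only [h, if_true, Bool.not_true]
        rw [ih]
        simp [aGo, pvIsLetter, h]
    · simp only [pvIsLetter, Bool.not_eq_true] at h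
      simp only [h, Bool.false_eq_true, if_false]
      rw [ih]
      simp [aGo, pvIsLetter, h]

theorem aGo_true_drop (l : List (Int × Int)) :
    aGo true l = aGo false (l.dropWhile pvIsLetter) := by
  induction l with
  | nil => rfl
  | cons p rest ih =>
    by_cases h : pvIsLetter p = true
    · simp [aGo, h, ih]
    · simp [aGo, h]

theorem aGo_false_nonletter_run (l : List (Int × Int)) :
    aGo false l = (l.takeWhile (fun q => pvIsLetter q == false)).map (·.1)
      ++ aGo false (l.dropWhile (fun q => pvIsLetter q == false)) := by
  induction l with
  | nil => rfl
  | cons p rest ih =>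
    by_cases h : pvIsLetter p = true
    · simp [h]
    · simp only [Bool.not_eq_true] at h
      simp [aGo, h, ih]

theorem aGo_false_eq_alt (l : List (Int × Int)) :
    aGo false l = token_string_alt l := by
  induction hn : l.length using Nat.strong_induction_on generalizing l with
  | _ n ih =>
    match l with
    | [] => rw [token_string_alt]; rfl
    | p :: rest =>
      by_cases h : pvIsLetter p = true
      · have hlen : (rest.dropWhile pvIsLetter).length < n := by
          subst hn; simpa using Nat.lt_succ_of_le (List.length_dropWhile_le _ _)
        rw [token_string_alt]
        simp only [h, if_true]
        have hdw : (rest.dropWhile (fun q => pvIsLetter q == true)) = rest.dropWhile pvIsLetter := by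
          simp
        simp only [aGo, h, Bool.not_false, aGo_true_drop, hdw]
        exact congrArg (555 :: ·) (ih _ hlen _ rfl)
      · have h' : pvIsLetter p = false := by simpa using h
        have hlen : (rest.dropWhile (fun q => pvIsLetter q == false)).length < n := by
          subst hn; simpa using Nat.lt_succ_of_le (List.length_dropWhile_le _ _)
        rw [token_string_alt]
        simp only [h', Bool.false_eq_true, if_false]
        simp only [aGo, h', Bool.false_eq_true, if_false]
        rw [aGo_false_nonletter_run rest]
        exact congrArg (fun t => p.1 :: _ ++ t) (ih _ hlen _ rfl)

-- ===== VERDICT (by name: the statement is the Claim_ definition above) =====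
theorem token_string_spec : Claim_equal_token_string := by
  intro array _
  unfold Spec_token_string token_string
  rw [token_string_fst array [] false, List.nil_append, aGo_false_eq_alt]
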